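-- pv_equiv track=rewrite | github.com/nirgodin/radio-stations-data-collection | data_collectors/logic/collectors/musixmatch/musixmatch_lyrics_collector.py | _serialize_lyrics
-- ===== SOURCE A (Python) =====
-- from typing import List, Dict, Tuple
--
-- MUSIXMATCH_LYRICS_END_SIGN = "..."
--
-- def _serialize_lyrics(raw_lyrics: str) -> List[str]:
--     lyrics = []
--
--     for row in raw_lyrics.split("\n"):
--         formatted_row = row.strip()
--
--         if formatted_row == MUSIXMATCH_LYRICS_END_SIGN:
--             break
--
--         if formatted_row != "":
--             lyrics.append(formatted_row)
--
--     return lyrics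
-- ===== SOURCE B (Python) =====
-- from typing import List
--
-- MUSIXMATCH_LYRICS_END_SIGN = "..."
--
-- def _serialize_lyrics(raw_lyrics: str) -> List[str]:
--     rows = [row.strip() for row in raw_lyrics.split("\n")]
--     try:
--         cut = rows.index(MUSIXMATCH_LYRICS_END_SIGN)
--     except ValueError:
--         cut = len(rows)
--     return [row for row in rows[:cut] if row != ""]
-- ===== Notes on version B (the rewrite author's own statement) =====
-- stated objective: alternative
-- what changed: Replaces the fused loop with early break by three separate stages: strip all rows up front, locate the terminator with list.index, then slice and filter the prefix.
import Mathlib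
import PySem

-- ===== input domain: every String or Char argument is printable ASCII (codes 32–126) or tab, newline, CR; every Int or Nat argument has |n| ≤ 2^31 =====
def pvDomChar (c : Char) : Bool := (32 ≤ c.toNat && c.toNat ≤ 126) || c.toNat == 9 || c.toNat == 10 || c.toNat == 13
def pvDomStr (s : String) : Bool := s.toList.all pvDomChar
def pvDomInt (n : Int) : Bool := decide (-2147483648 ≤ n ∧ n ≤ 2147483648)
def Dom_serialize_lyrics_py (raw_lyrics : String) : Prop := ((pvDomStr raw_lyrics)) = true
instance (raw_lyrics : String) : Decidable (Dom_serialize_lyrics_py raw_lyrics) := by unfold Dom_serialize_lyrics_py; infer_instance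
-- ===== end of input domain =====

-- B separates A's fused break-loop into three stages (strip all rows, find the terminator index, slice+filter); same cost, different decomposition.


-- ===== PORT A =====
-- the for-loop with break: structural recursion over the rows, accumulating lyrics
def serialize_lyrics_go (lyrics : List String) : List String → List String
  | [] => lyrics
  | row :: rest =>
    let formatted_row := PySem.Str.strip row
    if formatted_row == "..." then lyrics
    else if formatted_row != "" then serialize_lyrics_go (lyrics ++ [formatted_row]) rest
    else serialize_lyrics_go lyrics rest

def serialize_lyrics_py (raw_lyrics : String) : List String :=
  serialize_lyrics_go [] ((PySem.Str.split? raw_lyrics "\n").getD [])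

-- ===== PORT B =====
def serialize_lyrics_py_alt (raw_lyrics : String) : List String :=
  let rows := ((PySem.Str.split? raw_lyrics "\n").getD []).map PySem.Str.strip
  let cut : Nat := (PySem.List.index? rows "...").getD rows.length
  (PySem.List.slice rows none (some (cut : Int))).filter (fun row => row != "")

-- ===== PRECONDITION & SPEC =====
def Spec_serialize_lyrics_py (raw_lyrics : String) (out : List String) : Prop := out = serialize_lyrics_py_alt raw_lyrics
instance (raw_lyrics : String) (out : List String) : Decidable (Spec_serialize_lyrics_py raw_lyrics out) := by unfold Spec_serialize_lyrics_py; infer_instance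

-- ===== CLAIM (what is proved, stated in full; the proofs are below) =====
def Claim_equal_serialize_lyrics_py : Prop := ∀ (raw_lyrics : String), Dom_serialize_lyrics_py raw_lyrics → Spec_serialize_lyrics_py raw_lyrics (serialize_lyrics_py raw_lyrics)

-- ===== LEMMAS AND PROOFS =====

-- loop invariant: the break-loop over `rows` returns acc ++ (filter of the pre-terminator prefix of the stripped rows)
lemma serialize_lyrics_go_eq (rows : List String) (acc : List String) :
    serialize_lyrics_go acc rows =
      acc ++ (((rows.map PySem.Str.strip).take
        ((PySem.List.index? (rows.map PySem.Str.strip) "...").getD (rows.map PySem.Str.strip).length)).filter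
          (fun row => row != "")) := by
  induction rows generalizing acc with
  | nil => simp [serialize_lyrics_go]
  | cons r rest ih =>
    simp only [serialize_lyrics_go, List.map_cons]
    by_cases h : PySem.Str.strip r = "..."
    · rw [if_pos (by simpa using h)]
      have hidx : PySem.List.index? (PySem.Str.strip r :: List.map PySem.Str.strip rest) "..."
          = some 0 := by
        rw [h]; exact PySem.List.index?_cons_self "..." _
      rw [hidx]
      simp
    · rw [if_neg (by simpa using h), PySem.List.index?_cons_of_ne _ h]
      have htake : ∀ (L : List String),
          (PySem.Str.strip r :: L).take
            ((Option.map (fun x => x + 1) (PySem.List.index? L "...")).getD (L.length + 1))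
            = PySem.Str.strip r :: L.take ((PySem.List.index? L "...").getD L.length) := by
        intro L
        rcases hL : PySem.List.index? L "..." with _ | k <;> simp
      by_cases he : PySem.Str.strip r = ""
      · rw [if_neg (by simpa using he)]
        simp only [List.length_cons]
        rw [htake, ih]
        simp [he]
      · rw [if_pos (by simpa using he)]
        simp only [List.length_cons]
        rw [htake, ih]
        simp [he]

-- ===== VERDICT (by name: the statement is the Claim_ definition above) =====
theorem serialize_lyrics_py_spec : Claim_equal_serialize_lyrics_py := by
  intro raw _
  show serialize_lyrics_py raw = serialize_lyrics_py_alt raw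
  simp only [serialize_lyrics_py, serialize_lyrics_py_alt, serialize_lyrics_go_eq,
    PySem.List.slice_to_natCast, List.nil_append]
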